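-- pv_equiv track=rewrite | github.com/oborichkin/define-system | define/utils.py | mw_advanced
-- ===== SOURCE A (Python) =====
-- from typing import Generator, List, Generic, Iterable, Callable, Tuple
--
-- def mw_advanced(attr: int, d_plus: tuple, Q_j: List[tuple]) -> Tuple[int, int]:
--     count = 0
--     values = set()
--     for d_minus in Q_j:
--         if d_plus[attr] != d_minus[attr]:
--             count += 1
--             values.add(d_minus[attr])
--     return (count, len(values))
-- ===== SOURCE B (Python) =====
-- def mw_advanced(attr, d_plus, Q_j):
--     freq = {}
--     for d in Q_j:
--         v = d[attr]
--         freq[v] = freq.get(v, 0) + 1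
--     target = d_plus[attr]
--     return (len(Q_j) - freq.get(target, 0), len(freq) - (target in freq))
-- ===== Notes on version B (the rewrite author's own statement) =====
-- stated objective: alternative
-- what changed: B builds a frequency table of all attribute values in one pass with no equality branch, then derives the pair arithmetically: count = len(Q_j) - occurrences of d_plus[attr], distinct = number of keys minus 1 if d_plus[attr] occurs.
-- outside the precondition, e.g. on mw_advanced(5, (1,), []): A returns (0, 0), B raises IndexError
import Mathlib
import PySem

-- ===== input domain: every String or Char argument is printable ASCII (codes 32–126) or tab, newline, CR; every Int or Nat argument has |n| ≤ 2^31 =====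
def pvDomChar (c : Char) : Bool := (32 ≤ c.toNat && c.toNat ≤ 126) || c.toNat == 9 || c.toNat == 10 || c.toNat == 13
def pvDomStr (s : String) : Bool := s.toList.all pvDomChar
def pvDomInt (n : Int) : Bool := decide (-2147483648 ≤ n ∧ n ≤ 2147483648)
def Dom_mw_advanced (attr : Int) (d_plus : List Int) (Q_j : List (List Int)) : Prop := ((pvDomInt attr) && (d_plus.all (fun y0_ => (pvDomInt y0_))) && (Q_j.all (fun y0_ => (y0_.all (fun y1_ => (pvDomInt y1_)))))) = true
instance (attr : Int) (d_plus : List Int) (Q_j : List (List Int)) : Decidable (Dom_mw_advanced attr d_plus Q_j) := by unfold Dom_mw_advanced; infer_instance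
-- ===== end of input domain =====

-- B replaces A's per-element equality branch by a one-pass frequency table over all attribute
-- values, deriving both results arithmetically from the table (alternative decomposition, same cost).


-- ===== PORT A =====
def mw_advanced (attr : Int) (d_plus : List Int) (Q_j : List (List Int)) : Int × Int :=
  let r := Q_j.foldl (fun (st : Int × PySem.Set Int) d_minus =>
      if PySem.List.pyGetD d_plus attr 0 ≠ PySem.List.pyGetD d_minus attr 0 then
        (st.1 + 1, PySem.Set.add st.2 (PySem.List.pyGetD d_minus attr 0))
      else st) (0, PySem.Set.empty)
  (r.1, PySem.Set.len r.2)

-- ===== PORT B =====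
def mw_advanced_alt (attr : Int) (d_plus : List Int) (Q_j : List (List Int)) : Int × Int :=
  let freq := Q_j.foldl (fun (f : PySem.Dict Int Int) d =>
      f.insert (PySem.List.pyGetD d attr 0) (f.getD (PySem.List.pyGetD d attr 0) 0 + 1))
    PySem.Dict.empty
  let target := PySem.List.pyGetD d_plus attr 0
  ((Q_j.length : Int) - freq.getD target 0,
   (PySem.Dict.size freq : Int) - (if freq.contains target then 1 else 0))

-- ===== PRECONDITION & SPEC =====
-- Pre_ excludes exactly the inputs where tuple indexing raises IndexError: some row of Q_j
-- lacks index attr, or d_plus lacks it.  With Q_j empty and attr out of range for d_plus,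
-- A returns (0, 0) (it never indexes d_plus) while B raises IndexError; that corner is excluded.
def Pre_mw_advanced (attr : Int) (d_plus : List Int) (Q_j : List (List Int)) : Prop :=
  PySem.Raise.InRange d_plus.length attr ∧ ∀ row ∈ Q_j, PySem.Raise.InRange row.length attr
instance (attr : Int) (d_plus : List Int) (Q_j : List (List Int)) : Decidable (Pre_mw_advanced attr d_plus Q_j) := by unfold Pre_mw_advanced; infer_instance
def pvWitness_mw_advanced : Int × List Int × List (List Int) := (0, [1], [[2], [2], [3]])

def Spec_mw_advanced (attr : Int) (d_plus : List Int) (Q_j : List (List Int)) (out : Int × Int) : Prop := out = mw_advanced_alt attr d_plus Q_j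
instance (attr : Int) (d_plus : List Int) (Q_j : List (List Int)) (out : Int × Int) : Decidable (Spec_mw_advanced attr d_plus Q_j out) := by unfold Spec_mw_advanced; infer_instance

-- ===== CLAIM (what is proved, stated in full; the proofs are below) =====
def Claim_equal_mw_advanced : Prop := ∀ (attr : Int) (d_plus : List Int) (Q_j : List (List Int)), Dom_mw_advanced attr d_plus Q_j → Pre_mw_advanced attr d_plus Q_j → Spec_mw_advanced attr d_plus Q_j (mw_advanced attr d_plus Q_j)

-- ===== LEMMAS AND PROOFS =====

-- the differing values and the target's occurrences partition the value list
theorem pv_cnt (vs : List Int) (dv : Int) :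
    (vs.filter (fun x => x ≠ dv)).length + vs.count dv = vs.length := by
  induction vs with
  | nil => simp
  | cons a t ih => by_cases h : a = dv <;> simp [h] at ih ⊢ <;> omega

-- a PySem set's size is the Finset cardinality of its source list
theorem pv_oflen (l : List Int) : (PySem.Set.ofList l).length = l.toFinset.card := by
  rw [← List.toFinset_card_of_nodup (PySem.Set.nodup_ofList (xs := l))]
  congr 1; ext x
  simp [List.mem_toFinset, PySem.Set.mem_ofList]

-- distinct differing values = all distinct values minus the target if present
theorem pv_set_len (vs : List Int) (dv : Int) :
    ((PySem.Set.ofList (vs.filter (fun x => x ≠ dv))).length : Int)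
      = ((PySem.Set.ofList vs).length : Int) - (if dv ∈ vs then 1 else 0) := by
  rw [pv_oflen, pv_oflen]
  have h2 : (vs.filter (fun x => x ≠ dv)).toFinset = vs.toFinset.erase dv := by
    ext x; simp [List.mem_toFinset, and_comm]
  rw [h2, Finset.card_erase_eq_ite]
  by_cases hm : dv ∈ vs
  · have hc : 0 < vs.toFinset.card := Finset.card_pos.mpr ⟨dv, List.mem_toFinset.mpr hm⟩
    simp [List.mem_toFinset, hm]; omega
  · simp [List.mem_toFinset, hm]

-- A's loop characterised: differing count and the set of differing values
theorem pv_A_fold (dv : Int) (key : List Int → Int) (l : List (List Int)) (c : Int) (s : PySem.Set Int) :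
    l.foldl (fun (st : Int × PySem.Set Int) row =>
        if dv ≠ key row then (st.1 + 1, PySem.Set.add st.2 (key row)) else st) (c, s)
      = (c + (((l.map key).filter (fun x => x ≠ dv)).length : Int),
         PySem.Set.update s ((l.map key).filter (fun x => x ≠ dv))) := by
  induction l generalizing c s with
  | nil => simp [PySem.Set.update]
  | cons row t ih =>
    rw [List.foldl_cons]
    by_cases h : dv = key row
    · rw [if_neg (by simp [h]), ih]
      simp [h]
    · rw [if_pos h, ih]
      have hk : (decide (key row ≠ dv)) = true := by simp [Ne.symm h]
      simp only [List.map_cons, List.filter_cons, hk, if_pos, List.length_cons,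
        PySem.Set.update_cons]
      congr 1
      push_cast; ring

-- B's loop characterised: the final lookup of any value is its count among the mapped values
theorem pv_B_getD (key : List Int → Int) (l : List (List Int)) (d : PySem.Dict Int Int) (x : Int) :
    (l.foldl (fun f row => f.insert (key row) (f.getD (key row) 0 + 1)) d).getD x 0
      = d.getD x 0 + ((l.map key).count x : Int) := by
  induction l generalizing d with
  | nil => simp
  | cons row t ih =>
    rw [List.foldl_cons, ih, PySem.Dict.getD_insert]
    by_cases h : x = key row <;> simp [h, List.count_cons] <;> omega

theorem pv_glue (attr : Int) (d_plus : List Int) (Q_j : List (List Int)) :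
    mw_advanced attr d_plus Q_j = mw_advanced_alt attr d_plus Q_j := by
  simp only [mw_advanced, mw_advanced_alt]
  rw [pv_A_fold (PySem.List.pyGetD d_plus attr 0) (fun row => PySem.List.pyGetD row attr 0),
      pv_B_getD (fun row => PySem.List.pyGetD row attr 0)]
  have hkeys : (Q_j.foldl (fun (f : PySem.Dict Int Int) d =>
      f.insert (PySem.List.pyGetD d attr 0) (f.getD (PySem.List.pyGetD d attr 0) 0 + 1))
    PySem.Dict.empty).keys
      = PySem.Set.ofList (Q_j.map (fun row => PySem.List.pyGetD row attr 0)) := by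
    rw [PySem.Dict.keys_foldl_insert_key Q_j (fun row => PySem.List.pyGetD row attr 0)
        (fun f d => f.getD (PySem.List.pyGetD d attr 0) 0 + 1)]
    exact PySem.Set.update_empty _
  set dv := PySem.List.pyGetD d_plus attr 0 with hdv
  set vs := Q_j.map (fun row => PySem.List.pyGetD row attr 0) with hvs
  have hsz : (Q_j.foldl (fun (f : PySem.Dict Int Int) d =>
      f.insert (PySem.List.pyGetD d attr 0) (f.getD (PySem.List.pyGetD d attr 0) 0 + 1))
    PySem.Dict.empty).size = (PySem.Set.ofList vs).length := by
    rw [← hkeys]; simp [PySem.Dict.keys, PySem.Dict.size]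
  have hcon : (Q_j.foldl (fun (f : PySem.Dict Int Int) d =>
      f.insert (PySem.List.pyGetD d attr 0) (f.getD (PySem.List.pyGetD d attr 0) 0 + 1))
    PySem.Dict.empty).contains dv = decide (dv ∈ vs) := by
    rw [PySem.Dict.contains_eq_decide_mem_keys, hkeys]
    simp [PySem.Set.mem_ofList]
  rw [Prod.ext_iff]
  constructor
  · have h1 := pv_cnt vs dv
    have h2 : vs.length = Q_j.length := by rw [hvs]; exact List.length_map ..
    simp only [PySem.Dict.getD_empty]
    omega
  · rw [hsz, hcon]
    show PySem.Set.len (PySem.Set.update PySem.Set.empty (vs.filter (fun x => x ≠ dv))) = _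
    rw [PySem.Set.update_empty]
    show ((PySem.Set.ofList (vs.filter (fun x => x ≠ dv))).length : Int) = _
    rw [pv_set_len]
    by_cases hm : dv ∈ vs <;> simp [hm]

-- ===== VERDICT (by name: the statement is the Claim_ definition above) =====
theorem mw_advanced_spec : Claim_equal_mw_advanced := by
  intro attr d_plus Q_j _ _
  show mw_advanced attr d_plus Q_j = mw_advanced_alt attr d_plus Q_j
  exact pv_glue attr d_plus Q_j
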